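-- pv_equiv track=rewrite | github.com/NguyenTanThanh0709/StudyAtUniversity- | ĐSTT_CNTT/ThucHanh/Lab01/Excercise8.py | impressionNumber
-- ===== SOURCE A (Python) =====
-- def totalDigitsOfNumber(n):
--     total = 0
--     while (n > 0):
--         total = total + n % 10
--         n = int(n / 10)
--     return total
--
-- def impressionNumber(Name):
--     soulNumber1 = 0
--     for i in Name:
--
--             if i =='A' or i == 'J' or i == 'S':
--                 soulNumber1 += 1
--             if i =='B' or i == 'K' or i == 'T':
--                 soulNumber1 += 2
--             if i =='C' or i == 'L' or i == 'U':
--                 soulNumber1 += 3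
--             if i =='D' or i == 'M' or i == 'V':
--                 soulNumber1 += 4
--             if i =='E' or i == 'N' or i == 'W':
--                 soulNumber1 += 5
--             if i =='F' or i == 'O' or i == 'X':
--                 soulNumber1 += 6
--             if i =='G' or i == 'P' or i == 'Y':
--                 soulNumber1 += 7
--             if i =='H' or i == 'Q' or i == 'Z':
--                 soulNumber1 += 8
--             if i =='I' or i == 'R':
--                 soulNumber1 += 9
--
--     if soulNumber1 > 11:
--         return totalDigitsOfNumber(soulNumber1)
--     else:
--         return soulNumber1
-- ===== SOURCE B (Python) =====
-- def _digitSum(n):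
--     return 0 if n <= 0 else n % 10 + _digitSum(n // 10)
--
-- def impressionNumber(Name):
--     total = sum((ord(c) - 65) % 9 + 1 for c in Name if 'A' <= c <= 'Z')
--     return _digitSum(total) if total > 11 else total
-- ===== Notes on version B (the rewrite author's own statement) =====
-- stated objective: simpler
-- what changed: Replaces the 26-branch if-chain per character with the closed form ((ord(c)-65)%9)+1 over uppercase letters summed in a comprehension, and replaces the iterative float-division digit-sum loop with a recursive integer digit sum.
import Mathlib
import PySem

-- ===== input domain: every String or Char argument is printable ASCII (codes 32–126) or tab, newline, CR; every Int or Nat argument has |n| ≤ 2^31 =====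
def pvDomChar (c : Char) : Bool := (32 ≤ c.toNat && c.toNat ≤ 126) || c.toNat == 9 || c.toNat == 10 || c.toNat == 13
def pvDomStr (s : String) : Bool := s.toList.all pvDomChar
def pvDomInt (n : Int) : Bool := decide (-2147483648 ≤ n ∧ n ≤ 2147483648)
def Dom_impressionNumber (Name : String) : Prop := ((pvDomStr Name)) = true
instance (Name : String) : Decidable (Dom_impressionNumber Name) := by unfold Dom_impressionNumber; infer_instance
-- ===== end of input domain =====

-- B replaces the 26-branch letter table by the closed form ((ord c - 65) % 9) + 1 over
-- uppercase letters and the iterative digit-sum loop by a recursive digit sum (simpler).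

-- ===== PORT A =====
-- while-loop of totalDigitsOfNumber as tail recursion on (n, total).
-- Python's `int(n / 10)` truncates toward zero; for the n > 0 reached here it equals n / 10
-- (exact: n stays far below the float-precision window on Dom-sized inputs).
def pvTdLoop (n total : Int) : Int :=
  if _h : n > 0 then pvTdLoop (n / 10) (total + n % 10) else total
termination_by n.toNat
decreasing_by omega

def totalDigitsOfNumber (n : Int) : Int := pvTdLoop n 0

-- one iteration of A's for-loop body: the nine sequential ifs
def pvStepA (s : Int) (i : Char) : Int :=
  let s := if i = 'A' ∨ i = 'J' ∨ i = 'S' then s + 1 else s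
  let s := if i = 'B' ∨ i = 'K' ∨ i = 'T' then s + 2 else s
  let s := if i = 'C' ∨ i = 'L' ∨ i = 'U' then s + 3 else s
  let s := if i = 'D' ∨ i = 'M' ∨ i = 'V' then s + 4 else s
  let s := if i = 'E' ∨ i = 'N' ∨ i = 'W' then s + 5 else s
  let s := if i = 'F' ∨ i = 'O' ∨ i = 'X' then s + 6 else s
  let s := if i = 'G' ∨ i = 'P' ∨ i = 'Y' then s + 7 else s
  let s := if i = 'H' ∨ i = 'Q' ∨ i = 'Z' then s + 8 else s
  if i = 'I' ∨ i = 'R' then s + 9 else s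

def impressionNumber (Name : String) : Int :=
  let soulNumber1 := Name.toList.foldl pvStepA 0
  if soulNumber1 > 11 then totalDigitsOfNumber soulNumber1 else soulNumber1

-- ===== PORT B =====
def pvDigitSum (n : Int) : Int :=
  if _h : n ≤ 0 then 0 else n % 10 + pvDigitSum (n / 10)
termination_by n.toNat
decreasing_by omega

def impressionNumber_alt (Name : String) : Int :=
  let total := ((Name.toList.filter (fun c => decide ('A' ≤ c) && decide (c ≤ 'Z'))).map
    (fun c => ((c.toNat : Int) - 65) % 9 + 1)).sum
  if total > 11 then pvDigitSum total else total

-- ===== PRECONDITION & SPEC =====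
def Spec_impressionNumber (Name : String) (out : Int) : Prop := out = impressionNumber_alt Name
instance (Name : String) (out : Int) : Decidable (Spec_impressionNumber Name out) := by unfold Spec_impressionNumber; infer_instance

-- ===== CLAIM (what is proved, stated in full; the proofs are below) =====
def Claim_equal_impressionNumber : Prop := ∀ (Name : String), Dom_impressionNumber Name → Spec_impressionNumber Name (impressionNumber Name)

-- ===== LEMMAS AND PROOFS =====

-- per-character value of B (indicator form)
def pvG (c : Char) : Int :=
  if ('A' ≤ c ∧ c ≤ 'Z') then ((c.toNat : Int) - 65) % 9 + 1 else 0

lemma pvIteAdd (p : Prop) [Decidable p] (s k : Int) :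
    (if p then s + k else s) = s + (if p then k else 0) := by
  split_ifs <;> ring

lemma pvStepA_shift (s : Int) (c : Char) : pvStepA s c = s + pvStepA 0 c := by
  simp only [pvStepA, pvIteAdd]
  ring

lemma pvCharEq (c d : Char) : c = d ↔ c.toNat = d.toNat := by
  constructor
  · intro h; rw [h]
  · intro h; exact Char.ext (UInt32.toNat_inj.mp h)

lemma pvCharLe (c d : Char) : c ≤ d ↔ c.toNat ≤ d.toNat := by
  rw [Char.le_def, UInt32.le_iff_toNat_le]
  exact Iff.rfl

lemma pvStepA_eq_g (c : Char) : pvStepA 0 c = pvG c := by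
  simp only [pvStepA, pvG, pvCharEq, pvCharLe,
    show ('A':Char).toNat = 65 from rfl, show ('B':Char).toNat = 66 from rfl, show ('C':Char).toNat = 67 from rfl, show ('D':Char).toNat = 68 from rfl, show ('E':Char).toNat = 69 from rfl, show ('F':Char).toNat = 70 from rfl, show ('G':Char).toNat = 71 from rfl, show ('H':Char).toNat = 72 from rfl, show ('I':Char).toNat = 73 from rfl, show ('J':Char).toNat = 74 from rfl, show ('K':Char).toNat = 75 from rfl, show ('L':Char).toNat = 76 from rfl, show ('M':Char).toNat = 77 from rfl, show ('N':Char).toNat = 78 from rfl, show ('O':Char).toNat = 79 from rfl, show ('P':Char).toNat = 80 from rfl, show ('Q':Char).toNat = 81 from rfl, show ('R':Char).toNat = 82 from rfl, show ('S':Char).toNat = 83 from rfl, show ('T':Char).toNat = 84 from rfl, show ('U':Char).toNat = 85 from rfl, show ('V':Char).toNat = 86 from rfl, show ('W':Char).toNat = 87 from rfl, show ('X':Char).toNat = 88 from rfl, show ('Y':Char).toNat = 89 from rfl, show ('Z':Char).toNat = 90 from rfl]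
  by_cases h : 65 ≤ c.toNat ∧ c.toNat ≤ 90
  · rw [if_pos h]
    obtain ⟨h1, h2⟩ := h
    set n := c.toNat with hn
    clear hn
    interval_cases n <;> norm_num
  · rw [if_neg (by omega), if_neg (by omega), if_neg (by omega), if_neg (by omega),
      if_neg (by omega), if_neg (by omega), if_neg (by omega), if_neg (by omega),
      if_neg (by omega), if_neg h]

lemma pvFoldl_sum (l : List Char) (s : Int) :
    l.foldl pvStepA s = s + (l.map pvG).sum := by
  induction l generalizing s with
  | nil => simp
  | cons a t ih =>
    simp only [List.foldl_cons, List.map_cons, List.sum_cons]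
    rw [ih, pvStepA_shift, pvStepA_eq_g a]
    ring

lemma pvSum_g_filter (l : List Char) :
    (l.map pvG).sum =
      ((l.filter (fun c => decide ('A' ≤ c) && decide (c ≤ 'Z'))).map
        (fun c => ((c.toNat : Int) - 65) % 9 + 1)).sum := by
  induction l with
  | nil => rfl
  | cons a t ih =>
    by_cases h : ('A' ≤ a ∧ a ≤ 'Z') <;>
      simp [pvG, h, ih]

lemma pvTdLoop_eq (k : Nat) (n total : Int) (hk : n.toNat ≤ k) :
    pvTdLoop n total = total + pvDigitSum n := by
  induction k generalizing n total with
  | zero =>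
    have hn : ¬ n > 0 := by omega
    rw [pvTdLoop, pvDigitSum]
    simp [hn, show n ≤ 0 by omega]
  | succ k ih =>
    rw [pvTdLoop, pvDigitSum]
    by_cases hn : n > 0
    · have : (n / 10).toNat ≤ k := by omega
      simp only [hn, dif_pos, show ¬ n ≤ 0 by omega, dif_neg, not_false_iff]
      rw [ih _ _ this]
      ring
    · simp [hn, show n ≤ 0 by omega]

-- ===== VERDICT (by name: the statement is the Claim_ definition above) =====
theorem impressionNumber_spec : Claim_equal_impressionNumber := by
  intro Name hdom
  unfold Spec_impressionNumber impressionNumber impressionNumber_alt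
  dsimp only
  have hsoul : Name.toList.foldl pvStepA 0 =
      ((Name.toList.filter (fun c => decide ('A' ≤ c) && decide (c ≤ 'Z'))).map
        (fun c => ((c.toNat : Int) - 65) % 9 + 1)).sum := by
    rw [pvFoldl_sum, pvSum_g_filter]; ring
  rw [hsoul]
  split_ifs with h
  · exact pvTdLoop_eq _ _ 0 le_rfl |>.trans (by ring)
  · rfl
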